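-- pv_equiv track=rewrite | github.com/erturkmemmedli/Data-Structures-and-Algorithms | Data Structures/2 - Priority Queues and Disjoint Sets/parallel_processing.py | parallel_process
-- ===== SOURCE A (Python) =====
-- from collections import namedtuple
-- import heapq
--
-- Process = namedtuple("Process", ["thread", "started_at"])
--
-- def parallel_process(thread, process_times):
--     result = []
--     my_heap = []
--     heapq.heapify(my_heap)
--     for i in range(len(process_times)):
--         if i < thread:
--             heapq.heappush(my_heap, (process_times[i], i))
--             result.append(Process(i, 0))
--         else:
--             minimum = heapq.heappop(my_heap)
--             heapq.heappush(my_heap, (minimum[0] + process_times[i], minimum[1]))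
--             result.append(Process(minimum[1], minimum[0]))
--     return result
-- ===== SOURCE B (Python) =====
-- from collections import namedtuple
--
-- Process = namedtuple("Process", ["thread", "started_at"])
--
-- def parallel_process(thread, process_times):
--     result = []
--     finish = []  # finish[t] = time at which thread t becomes free
--     for i, p in enumerate(process_times):
--         if i < thread:
--             finish.append(p)
--             result.append(Process(i, 0))
--         else:
--             m = min(finish)
--             t = finish.index(m)
--             result.append(Process(t, m))
--             finish[t] = m + p
--     return result
-- ===== Notes on version B (the rewrite author's own statement) =====
-- stated objective: simpler
-- what changed: Replaces the binary heap of (finish_time, thread) tuples by a plain per-thread list of accumulated finish times: each process is assigned via min()/index() over that list (same tie-break: smallest finish time, then smallest thread index) and the slot is updated in place.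
import Mathlib
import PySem

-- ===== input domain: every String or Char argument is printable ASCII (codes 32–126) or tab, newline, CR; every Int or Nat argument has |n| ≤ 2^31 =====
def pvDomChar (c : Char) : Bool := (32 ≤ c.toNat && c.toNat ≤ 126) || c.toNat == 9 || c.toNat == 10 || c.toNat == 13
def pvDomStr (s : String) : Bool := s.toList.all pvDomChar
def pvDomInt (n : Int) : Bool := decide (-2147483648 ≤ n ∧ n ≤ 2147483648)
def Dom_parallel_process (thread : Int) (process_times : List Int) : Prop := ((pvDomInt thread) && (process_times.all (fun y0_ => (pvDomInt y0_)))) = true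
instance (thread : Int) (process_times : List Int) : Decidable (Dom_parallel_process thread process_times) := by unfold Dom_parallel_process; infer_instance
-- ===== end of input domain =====

-- B replaces A's binary heap of (finish_time, thread) tuples by a plain per-thread list of
-- accumulated finish times, scanned with min/index (same tie-break); objective: simpler.

-- ===== PORT A =====
-- Python tuple comparison on (finish_time, thread_index): lexicographic.
def pvLexLt (a b : Int × Int) : Bool := a.1 < b.1 || (a.1 == b.1 && a.2 < b.2)

-- heapq.heappop's result: the minimum tuple of the heap's contents (ties are fully
-- equal tuples, so the value is well defined); `none` = pop from empty heap (IndexError).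
def pvFindMin? : List (Int × Int) → Option (Int × Int)
  | [] => none
  | a :: as => some (as.foldl (fun m b => if pvLexLt b m then b else m) a)

-- one iteration of A's loop: state = (result, heap contents); pi = (process_times[i], i)
def pvStepA (thread : Int) (st : List (Int × Int) × List (Int × Int)) (pi : Int × Nat) :
    List (Int × Int) × List (Int × Int) :=
  if (pi.2 : Int) < thread then
    (st.1 ++ [((pi.2 : Int), 0)], st.2 ++ [(pi.1, (pi.2 : Int))])
  else
    match pvFindMin? st.2 with
    | none => st   -- heappop on an empty heap raises IndexError; excluded by Pre_
    | some m => (st.1 ++ [(m.2, m.1)], (st.2.erase m) ++ [(m.1 + pi.1, m.2)])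

def parallel_process (thread : Int) (process_times : List Int) : List (Int × Int) :=
  (process_times.zipIdx.foldl (pvStepA thread) ([], [])).1

-- ===== PORT B =====
-- one iteration of B's loop: state = (result, finish) with finish[t] = time thread t is free
def pvStepB (thread : Int) (st : List (Int × Int) × List Int) (pi : Int × Nat) :
    List (Int × Int) × List Int :=
  if (pi.2 : Int) < thread then
    (st.1 ++ [((pi.2 : Int), 0)], st.2 ++ [pi.1])
  else
    match st.2.min? with
    | none => st   -- min([]) raises ValueError; excluded by Pre_
    | some m =>
      let t := st.2.idxOf m
      (st.1 ++ [((t : Int), m)], st.2.set t (m + pi.1))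

def parallel_process_alt (thread : Int) (process_times : List Int) : List (Int × Int) :=
  (process_times.zipIdx.foldl (pvStepB thread) ([], [])).1

-- ===== PRECONDITION & SPEC =====
-- Pre_ excludes exactly the inputs on which A raises: with thread ≤ 0 and a nonempty
-- process list, the first iteration pops from an empty heap (IndexError).
def Pre_parallel_process (thread : Int) (process_times : List Int) : Prop :=
  process_times = [] ∨ 1 ≤ thread

instance (thread : Int) (process_times : List Int) : Decidable (Pre_parallel_process thread process_times) := by
  unfold Pre_parallel_process; infer_instance

def pvWitness_parallel_process : Int × List Int := (2, [3, 1, 4, 1])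

def Spec_parallel_process (thread : Int) (process_times : List Int) (out : List (Int × Int)) : Prop := out = parallel_process_alt thread process_times
instance (thread : Int) (process_times : List Int) (out : List (Int × Int)) : Decidable (Spec_parallel_process thread process_times out) := by unfold Spec_parallel_process; infer_instance

-- ===== CLAIM (what is proved, stated in full; the proofs are below) =====
def Claim_equal_parallel_process : Prop := ∀ (thread : Int) (process_times : List Int), Dom_parallel_process thread process_times → Pre_parallel_process thread process_times → Spec_parallel_process thread process_times (parallel_process thread process_times)

-- ===== LEMMAS AND PROOFS =====

-- the (propositional) lexicographic order underlying pvLexLt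
def pvLexLe (a b : Int × Int) : Prop := a.1 < b.1 ∨ (a.1 = b.1 ∧ a.2 ≤ b.2)

theorem pvLexLe_refl (a : Int × Int) : pvLexLe a a := by unfold pvLexLe; omega

theorem pvLexLt_to_le {a b : Int × Int} (h : pvLexLt a b = true) : pvLexLe a b := by
  simp [pvLexLt] at h; unfold pvLexLe; omega

theorem pvLexLt_false_to_le {a b : Int × Int} (h : ¬ pvLexLt a b = true) : pvLexLe b a := by
  simp [pvLexLt] at h; unfold pvLexLe; omega

theorem pvLexLe_trans {a b c : Int × Int} (h1 : pvLexLe a b) (h2 : pvLexLe b c) : pvLexLe a c := by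
  unfold pvLexLe at *; omega

theorem pvLexLe_antisymm {a b : Int × Int} (h1 : pvLexLe a b) (h2 : pvLexLe b a) : a = b := by
  rcases a with ⟨a1, a2⟩; rcases b with ⟨b1, b2⟩; simp [pvLexLe] at *; omega

-- the fold inside pvFindMin? returns an element of the list that is lexicographically minimal
theorem pvFoldMin_spec : ∀ (as : List (Int × Int)) (a : Int × Int),
    (as.foldl (fun m b => if pvLexLt b m then b else m) a) ∈ a :: as ∧
    ∀ y ∈ a :: as, pvLexLe (as.foldl (fun m b => if pvLexLt b m then b else m) a) y := by
  intro as
  induction as with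
  | nil =>
    intro a
    constructor
    · simp
    · intro y hy; simp at hy; subst hy; exact pvLexLe_refl _
  | cons b as ih =>
    intro a
    simp only [List.foldl_cons]
    have hca : pvLexLe (if pvLexLt b a then b else a) a := by
      split
      · exact pvLexLt_to_le (by assumption)
      · exact pvLexLe_refl a
    have hcb : pvLexLe (if pvLexLt b a then b else a) b := by
      split
      · exact pvLexLe_refl b
      · exact pvLexLt_false_to_le (by assumption)
    have hcm : (if pvLexLt b a then b else a) = a ∨ (if pvLexLt b a then b else a) = b := by
      split
      · right; rfl
      · left; rfl
    obtain ⟨hmem, hmin⟩ := ih (if pvLexLt b a then b else a)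
    constructor
    · rcases List.mem_cons.mp hmem with h | h
      · rcases hcm with h2 | h2 <;> rw [h, h2] <;> simp
      · simp [h]
    · intro y hy
      have hhead := hmin _ (List.mem_cons_self)
      rcases List.mem_cons.mp hy with h | h
      · subst h; exact pvLexLe_trans hhead hca
      · rcases List.mem_cons.mp h with h2 | h2
        · subst h2; exact pvLexLe_trans hhead hcb
        · exact hmin _ (List.mem_cons_of_mem _ h2)

-- B's finish list viewed as the heap's contents: (finish[t], t) for each t
def pvEnum (finish : List Int) : List (Int × Int) :=
  finish.zipIdx.map (fun p => (p.1, (p.2 : Int)))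

theorem pvEnum_length (l : List Int) : (pvEnum l).length = l.length := by simp [pvEnum]

theorem pvEnum_getElem (l : List Int) (n : Nat) (h : n < l.length) :
    (pvEnum l)[n]'(by simpa [pvEnum_length] using h) = (l[n], (n : Int)) := by
  simp [pvEnum, List.getElem_zipIdx]

theorem pvEnum_mem {l : List Int} {y : Int × Int} (hy : y ∈ pvEnum l) :
    ∃ n, ∃ h : n < l.length, y = (l[n], (n : Int)) := by
  obtain ⟨n, hn, he⟩ := List.mem_iff_getElem.mp hy
  rw [pvEnum_length] at hn
  exact ⟨n, hn, by rw [← he, pvEnum_getElem l n hn]⟩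

theorem pvEnum_append_singleton (l : List Int) (a : Int) :
    pvEnum (l ++ [a]) = pvEnum l ++ [(a, (l.length : Int))] := by
  simp [pvEnum, List.zipIdx_append]

theorem pvEnum_set (l : List Int) (t : Nat) (v : Int) :
    pvEnum (l.set t v) = (pvEnum l).set t (v, (t : Int)) := by
  apply List.ext_getElem
  · simp [pvEnum_length]
  · intro n h1 h2
    rw [pvEnum_length, List.length_set] at h1
    rw [pvEnum_getElem _ n (by simpa using h1)]
    rw [List.getElem_set, List.getElem_set]
    by_cases hn : t = n
    · subst hn; simp
    · simp [hn, pvEnum_getElem _ n h1]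

theorem pvIdxOf_le_of_getElem : ∀ (l : List Int) (n : Nat) (h : n < l.length) (m : Int),
    l[n] = m → l.idxOf m ≤ n := by
  intro l
  induction l with
  | nil => intro n h; simp at h
  | cons a as ih =>
    intro n h m he
    by_cases ha : a = m
    · simp [ha]
    · cases n with
      | zero => simp at he; exact absurd he ha
      | succ n =>
        simp only [List.idxOf_cons]
        have : (a == m) = false := by simp [ha]
        rw [this]
        simp only [cond_false]
        have := ih n (by simpa using h) m (by simpa using he)
        omega

-- the pair B picks, (min finish, first index of it), is the lexicographic minimum of pvEnum finish
theorem pvEnum_min_spec (l : List Int) (m : Int) (hm : l.min? = some m) :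
    (m, (l.idxOf m : Int)) ∈ pvEnum l ∧ ∀ y ∈ pvEnum l, pvLexLe (m, (l.idxOf m : Int)) y := by
  obtain ⟨hmem, hle⟩ := List.min?_eq_some_iff.mp hm
  have ht : l.idxOf m < l.length := List.idxOf_lt_length_of_mem hmem
  have hget : l[l.idxOf m] = m := List.getElem_idxOf ht
  constructor
  · have hpair : (m, (l.idxOf m : Int)) = (pvEnum l)[l.idxOf m]'(by simpa [pvEnum_length] using ht) := by
      rw [pvEnum_getElem l _ ht, hget]
    rw [hpair]
    exact List.getElem_mem _
  · intro y hy
    obtain ⟨n, hn, he⟩ := pvEnum_mem hy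
    subst he
    have h1 : m ≤ l[n] := hle _ (List.getElem_mem hn)
    rcases lt_or_eq_of_le h1 with h2 | h2
    · left; exact h2
    · right
      refine ⟨h2, ?_⟩
      have := pvIdxOf_le_of_getElem l n hn m h2.symm
      omega

-- erasing the picked pair from pvEnum removes exactly position t
theorem pvEnum_erase (l : List Int) (t : Nat) (ht : t < l.length) :
    (pvEnum l).erase (l[t], (t : Int)) = (pvEnum l).take t ++ (pvEnum l).drop (t + 1) := by
  have hsplit : pvEnum l = (pvEnum l).take t ++ ((l[t], (t : Int)) :: (pvEnum l).drop (t + 1)) := by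
    conv_lhs => rw [← List.take_append_drop t (pvEnum l)]
    rw [List.drop_eq_getElem_cons (by simpa [pvEnum_length] using ht)]
    rw [pvEnum_getElem l t ht]
  have hnot : (l[t], (t : Int)) ∉ (pvEnum l).take t := by
    intro hmem
    obtain ⟨n, hn, he⟩ := List.mem_iff_getElem.mp hmem
    have hnt : n < t := by
      have := hn; simp [List.length_take, pvEnum_length] at this; omega
    rw [List.getElem_take] at he
    have := pvEnum_getElem l n (by omega)
    rw [this] at he
    have : (n : Int) = (t : Int) := congrArg Prod.snd he
    omega
  conv_lhs => rw [hsplit]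
  rw [List.erase_append_right _ hnot, List.erase_cons_head]

-- updating slot t is, up to permutation, erasing the old pair and appending the new one
theorem pvSet_perm (l : List Int) (t : Nat) (ht : t < l.length) (v : Int) :
    List.Perm (((pvEnum l).take t ++ (pvEnum l).drop (t + 1)) ++ [(v, (t : Int))]) (pvEnum (l.set t v)) := by
  rw [pvEnum_set]
  have hlt : t < (pvEnum l).length := by simpa [pvEnum_length] using ht
  rw [List.set_eq_take_append_cons_drop, if_pos hlt]
  exact (List.perm_append_singleton _ _).trans List.perm_middle.symm

-- main loop invariant: same results, heap ≈ pvEnum finish, finish length = i while activating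
theorem pvLoop (thread : Int) (h1 : 1 ≤ thread) :
    ∀ (l : List Int) (k : Nat) (resA resB heap : List (Int × Int)) (finish : List Int),
    resA = resB → List.Perm heap (pvEnum finish) → ((k : Int) < thread → finish.length = k) →
    (k = 0 ∨ finish ≠ []) →
    ((l.zipIdx k).foldl (pvStepA thread) (resA, heap)).1 =
      ((l.zipIdx k).foldl (pvStepB thread) (resB, finish)).1 := by
  intro l
  induction l with
  | nil => intro k resA resB heap finish hres _ _ _; simpa using hres
  | cons a l ih =>
    intro k resA resB heap finish hres hperm hlen hne
    rw [List.zipIdx_cons]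
    simp only [List.foldl_cons]
    by_cases hc : (k : Int) < thread
    · -- activation: thread k starts at time 0
      have hfl : finish.length = k := hlen hc
      rw [show pvStepA thread (resA, heap) (a, k) =
            (resA ++ [((k : Int), 0)], heap ++ [(a, (k : Int))]) by
          simp [pvStepA, hc]]
      rw [show pvStepB thread (resB, finish) (a, k) =
            (resB ++ [((k : Int), 0)], finish ++ [a]) by
          simp [pvStepB, hc]]
      apply ih (k + 1)
      · rw [hres]
      · rw [pvEnum_append_singleton, hfl]
        exact hperm.append_right _
      · intro _; simp [hfl]
      · right; simp
    · -- assignment: pop the earliest-free thread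
      have hk1 : k ≠ 0 := by
        intro h; subst h; simp at hc; omega
      have hfne : finish ≠ [] := by
        rcases hne with h | h
        · exact absurd h hk1
        · exact h
      have hheapne : heap ≠ [] := by
        intro h
        have := hperm.length_eq
        rw [h, pvEnum_length] at this
        exact hfne (List.eq_nil_of_length_eq_zero this.symm)
      obtain ⟨h0, hs, hh⟩ := List.exists_cons_of_ne_nil hheapne
      obtain ⟨m, hm⟩ : ∃ m, finish.min? = some m := by
        cases h : finish.min? with
        | none => exact absurd (List.min?_eq_none_iff.mp h) hfne
        | some m => exact ⟨m, rfl⟩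
      -- the popped tuple equals B's (min value, its first index)
      have hx : pvFindMin? heap = some (m, (finish.idxOf m : Int)) := by
        rw [hh]
        simp only [pvFindMin?, Option.some_inj]
        obtain ⟨hxm, hxmin⟩ := pvFoldMin_spec hs h0
        obtain ⟨hym, hymin⟩ := pvEnum_min_spec finish m hm
        rw [← hh] at hxm hxmin
        apply pvLexLe_antisymm
        · exact hxmin _ (hperm.symm.subset hym)
        · exact hymin _ (hperm.subset hxm)
      have ht : finish.idxOf m < finish.length :=
        List.idxOf_lt_length_of_mem (List.min?_eq_some_iff.mp hm).1
      have hget : finish[finish.idxOf m] = m := List.getElem_idxOf ht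
      rw [show pvStepA thread (resA, heap) (a, k) =
            (resA ++ [((finish.idxOf m : Int), m)],
              heap.erase (m, (finish.idxOf m : Int)) ++ [(m + a, (finish.idxOf m : Int))]) by
          simp [pvStepA, hc, hx]]
      rw [show pvStepB thread (resB, finish) (a, k) =
            (resB ++ [((finish.idxOf m : Int), m)], finish.set (finish.idxOf m) (m + a)) by
          simp [pvStepB, hc, hm]]
      apply ih (k + 1)
      · rw [hres]
      · have he1 : List.Perm (heap.erase (m, (finish.idxOf m : Int)))
            ((pvEnum finish).erase (m, (finish.idxOf m : Int))) := hperm.erase _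
        have he2 : (pvEnum finish).erase (m, (finish.idxOf m : Int)) =
            (pvEnum finish).take (finish.idxOf m) ++ (pvEnum finish).drop (finish.idxOf m + 1) := by
          have h3 := pvEnum_erase finish (finish.idxOf m) ht
          rwa [hget] at h3
        have hstep : List.Perm (heap.erase (m, (finish.idxOf m : Int)) ++ [(m + a, (finish.idxOf m : Int))])
            (((pvEnum finish).take (finish.idxOf m) ++ (pvEnum finish).drop (finish.idxOf m + 1))
              ++ [(m + a, (finish.idxOf m : Int))]) := by
          rw [← he2]; exact he1.append_right _
        exact hstep.trans (pvSet_perm finish _ ht _)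
      · intro hlt2
        push_cast at hlt2 hc
        exfalso; omega
      · right
        intro h
        apply hfne
        have hl2 := congrArg List.length h
        rw [List.length_set] at hl2
        exact List.eq_nil_of_length_eq_zero (by simpa using hl2)

-- ===== VERDICT (by name: the statement is the Claim_ definition above) =====
theorem parallel_process_spec : Claim_equal_parallel_process := by
  intro thread process_times _ hpre
  unfold Spec_parallel_process parallel_process parallel_process_alt
  rcases hpre with h | h
  · subst h; rfl
  · exact pvLoop thread h process_times 0 [] [] [] [] rfl (by simp [pvEnum]) (by simp) (Or.inl rfl)
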